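-- pv_equiv track=rewrite | github.com/yuki-tamaribuchi/SlowAPI | src/framework/urls/resolver.py | path_matching
-- ===== SOURCE A (Python) =====
-- def is_matched_path(url, url_pattern, path_parameters_mask):
-- 	path_mask = [False if element else True for element in path_parameters_mask]
-- 	splitted_url = url.split("/")
--
-- 	if "" in splitted_url:
-- 		splitted_url.remove("")
--
-- 	splitted_url_pattern = url_pattern['url'].split("/")
--
-- 	if "" in splitted_url_pattern:
-- 		splitted_url_pattern.remove("")
--
-- 	masked_url = [token for mask, token in zip(path_mask, splitted_url) if mask]
-- 	masked_url_pattern = [token for mask, token in zip(path_mask, splitted_url_pattern) if mask]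
--
-- 	if masked_url == masked_url_pattern:
-- 		return True, len(masked_url)
--
-- 	return False, None
--
-- def path_matching(url, url_patterns, path_parameters_masks):
-- 	matched_idx_arr = []
-- 	matched_length_arr = []
--
-- 	for i in range(len(url_patterns)):
-- 		is_matched, matched_length = is_matched_path(url, url_patterns[i], path_parameters_masks[i])
--
-- 		if is_matched:
-- 			matched_idx_arr.append(i)
-- 			matched_length_arr.append(matched_length)
--
-- 	if len(matched_idx_arr)==1:
-- 		return matched_idx_arr[0]
--
-- 	elif  len(matched_idx_arr)>1:
--
-- 		#もし2つ以上マッチしていたら最長一致法で選択する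
-- 		max_length_idx = matched_idx_arr[matched_length_arr.index(max(matched_length_arr))]
-- 		#しかし、もしmatched_length_arrに同値が入っていたらどうするか決めていない
-- 		#この場合前方からサーチして最初に見つかったインデックスになる
--
-- 		return max_length_idx
--
-- 	return
-- ===== SOURCE B (Python) =====
-- def is_matched_path(url, url_pattern, path_parameters_mask):
-- 	path_mask = [False if element else True for element in path_parameters_mask]
-- 	splitted_url = url.split("/")
--
-- 	if "" in splitted_url:
-- 		splitted_url.remove("")
--
-- 	splitted_url_pattern = url_pattern['url'].split("/")
--
-- 	if "" in splitted_url_pattern: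
-- 		splitted_url_pattern.remove("")
--
-- 	masked_url = [token for mask, token in zip(path_mask, splitted_url) if mask]
-- 	masked_url_pattern = [token for mask, token in zip(path_mask, splitted_url_pattern) if mask]
--
-- 	if masked_url == masked_url_pattern:
-- 		return True, len(masked_url)
--
-- 	return False, None
--
-- def path_matching(url, url_patterns, path_parameters_masks):
-- 	best_idx = None
-- 	best_len = -1
--
-- 	for i, url_pattern in enumerate(url_patterns):
-- 		is_matched, matched_length = is_matched_path(url, url_pattern, path_parameters_masks[i])
--
-- 		if is_matched and matched_length > best_len:
-- 			best_len = matched_length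
-- 			best_idx = i
--
-- 	return best_idx
-- ===== Notes on version B (the rewrite author's own statement) =====
-- stated objective: simpler
-- what changed: Replaces A's two-phase scheme (collect matched indices and lengths into two parallel lists, then a max() scan plus a list.index() rescan) by a single accumulator pass that keeps the best (strictly longest, earliest) match so far and returns its index.
import Mathlib
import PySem

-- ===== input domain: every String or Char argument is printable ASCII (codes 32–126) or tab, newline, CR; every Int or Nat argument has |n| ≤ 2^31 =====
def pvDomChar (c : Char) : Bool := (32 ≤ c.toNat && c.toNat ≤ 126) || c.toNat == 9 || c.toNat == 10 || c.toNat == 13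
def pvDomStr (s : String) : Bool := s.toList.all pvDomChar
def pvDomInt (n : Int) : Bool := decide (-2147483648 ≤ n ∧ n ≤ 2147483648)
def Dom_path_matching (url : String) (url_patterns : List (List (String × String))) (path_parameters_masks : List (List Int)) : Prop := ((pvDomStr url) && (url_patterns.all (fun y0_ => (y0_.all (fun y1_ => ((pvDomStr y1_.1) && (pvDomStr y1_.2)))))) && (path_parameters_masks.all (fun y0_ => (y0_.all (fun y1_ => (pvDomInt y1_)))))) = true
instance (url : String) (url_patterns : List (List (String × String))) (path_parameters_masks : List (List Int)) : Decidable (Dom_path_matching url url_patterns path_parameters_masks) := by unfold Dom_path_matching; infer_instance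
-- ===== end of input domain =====

-- ===== PORT A =====
-- B replaces A's two parallel result lists plus a max()+index() rescan by one best-so-far accumulator pass (objective: simpler).
-- Shared helper, kept as-is in both implementations (Python returns (True, len) or (False, None)).
def is_matched_path (url : String) (url_pattern : List (String × String)) (path_parameters_mask : List Int) : Bool × Option Int :=
  let path_mask : List Bool := path_parameters_mask.map (fun element => if element ≠ 0 then false else true)
  let splitted_url := (PySem.Str.split? url "/").getD []   -- sep "/" ≠ "", always some
  let splitted_url := if "" ∈ splitted_url then (PySem.List.remove? splitted_url "").getD splitted_url else splitted_url
  let splitted_url_pattern := (PySem.Str.split? ((PySem.Dict.get? (PySem.Dict.mk url_pattern) "url").getD "") "/").getD []   -- KeyError excluded by Pre_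
  let splitted_url_pattern := if "" ∈ splitted_url_pattern then (PySem.List.remove? splitted_url_pattern "").getD splitted_url_pattern else splitted_url_pattern
  let masked_url := ((path_mask.zip splitted_url).filter (fun p => p.1)).map (fun p => p.2)
  let masked_url_pattern := ((path_mask.zip splitted_url_pattern).filter (fun p => p.1)).map (fun p => p.2)
  if masked_url == masked_url_pattern then (true, some (masked_url.length : Int))
  else (false, none)

def path_matching (url : String) (url_patterns : List (List (String × String))) (path_parameters_masks : List (List Int)) : Option Int :=
  let r := (PySem.List.pyRange 0 (url_patterns.length : Int)).foldl
    (fun (acc : List Int × List Int) (i : Int) =>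
      match is_matched_path url ((PySem.List.pyGet? url_patterns i).getD []) ((PySem.List.pyGet? path_parameters_masks i).getD []) with
      | (is_matched, matched_length) =>
        if is_matched then (acc.1 ++ [i], acc.2 ++ [matched_length.getD 0]) else acc)   -- matched_length is some _ whenever is_matched
    ([], [])
  if r.1.length = 1 then PySem.List.pyGet? r.1 0
  else if 1 < r.1.length then
    match PySem.List.max? r.2 (fun x => x) with
    | none => none   -- unreachable (max() of a nonempty list)
    | some mx =>
      match PySem.List.index? r.2 mx with
      | none => none   -- unreachable (mx ∈ r.2)
      | some j => PySem.List.pyGet? r.1 (j : Int)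
  else none

-- ===== PORT B =====
def path_matching_alt (url : String) (url_patterns : List (List (String × String))) (path_parameters_masks : List (List Int)) : Option Int :=
  let r := (PySem.List.enumerate url_patterns 0).foldl
    (fun (acc : Option Int × Int) (p : Int × List (String × String)) =>
      match is_matched_path url p.2 ((PySem.List.pyGet? path_parameters_masks p.1).getD []) with
      | (is_matched, matched_length) =>
        if is_matched && decide (acc.2 < matched_length.getD 0) then (some p.1, matched_length.getD 0) else acc)
    (none, -1)
  r.1

-- ===== PRECONDITION & SPEC =====
-- Pre_ excludes exactly the inputs on which the Python A raises: an IndexError when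
-- path_parameters_masks is shorter than url_patterns, or a KeyError when a pattern dict lacks the key "url".
def Pre_path_matching (url : String) (url_patterns : List (List (String × String))) (path_parameters_masks : List (List Int)) : Prop :=
  url_patterns.length ≤ path_parameters_masks.length ∧
  url_patterns.all (fun d => (PySem.Dict.get? (PySem.Dict.mk d) "url").isSome) = true
instance (url : String) (url_patterns : List (List (String × String))) (path_parameters_masks : List (List Int)) : Decidable (Pre_path_matching url url_patterns path_parameters_masks) := by unfold Pre_path_matching; infer_instance
def pvWitness_path_matching : String × (List (List (String × String))) × List (List Int) :=
  ("api/users/7", [[("url", "api/users/1")], [("url", "api/users")]], [[0, 0, 1], [0, 0]])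
def Spec_path_matching (url : String) (url_patterns : List (List (String × String))) (path_parameters_masks : List (List Int)) (out : Option Int) : Prop := out = path_matching_alt url url_patterns path_parameters_masks
instance (url : String) (url_patterns : List (List (String × String))) (path_parameters_masks : List (List Int)) (out : Option Int) : Decidable (Spec_path_matching url url_patterns path_parameters_masks out) := by unfold Spec_path_matching; infer_instance

-- ===== CLAIM (what is proved, stated in full; the proofs are below) =====
def Claim_equal_path_matching : Prop := ∀ (url : String) (url_patterns : List (List (String × String))) (path_parameters_masks : List (List Int)), Dom_path_matching url url_patterns path_parameters_masks → Pre_path_matching url url_patterns path_parameters_masks → Spec_path_matching url url_patterns path_parameters_masks (path_matching url url_patterns path_parameters_masks)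

-- ===== LEMMAS AND PROOFS =====

-- A's loop step and B's loop step, abstracted over the per-index match result f i.
def pvStepA (f : Int → Bool × Option Int) (acc : List Int × List Int) (i : Int) : List Int × List Int :=
  match f i with
  | (m, ml) => if m then (acc.1 ++ [i], acc.2 ++ [ml.getD 0]) else acc

def pvStepB (f : Int → Bool × Option Int) (acc : Option Int × Int) (i : Int) : Option Int × Int :=
  match f i with
  | (m, ml) => if m && decide (acc.2 < ml.getD 0) then (some i, ml.getD 0) else acc

-- Invariant relating A's two parallel lists to B's best-so-far accumulator.
def pvRel (sA : List Int × List Int) (sB : Option Int × Int) : Prop :=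
  sA.1.length = sA.2.length ∧
  ((sA.2 = [] ∧ sB = (none, -1)) ∨
   (PySem.List.max? sA.2 (fun x => x) = some sB.2 ∧
    ∃ j : Nat, PySem.List.index? sA.2 sB.2 = some j ∧ sB.1 = PySem.List.pyGet? sA.1 (j : Int)))

theorem pvShape (url : String) (p : List (String × String)) (mk : List Int) :
    is_matched_path url p mk = (false, none) ∨
    ∃ k : Nat, is_matched_path url p mk = (true, some (k : Int)) := by
  have gen : ∀ (b : Bool) (n : Nat),
      ((if b = true then ((true : Bool), some ((n : Nat) : Int)) else (false, none)) = (false, none) ∨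
        ∃ k : Nat, (if b = true then ((true : Bool), some ((n : Nat) : Int)) else (false, none))
          = (true, some ((k : Nat) : Int))) := by
    intro b n
    cases b
    · exact Or.inl (by simp)
    · exact Or.inr ⟨n, by simp⟩
  unfold is_matched_path
  exact gen _ _

theorem pvMaxIdCons {x : Int} {t : List Int} {m : Int}
    (h : PySem.List.max? (x :: t) (fun y => y) = some m) : t.foldl max x = m := by
  rw [PySem.List.max?_id_cons] at h
  exact Option.some.inj h

theorem pvStep (f : Int → Bool × Option Int) (sA : List Int × List Int) (sB : Option Int × Int)
    (i : Int)
    (hf : f i = (false, none) ∨ ∃ k : Nat, f i = (true, some (k : Int)))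
    (h : pvRel sA sB) : pvRel (pvStepA f sA i) (pvStepB f sB i) := by
  rcases hf with hf | ⟨k, hf⟩
  · simpa [pvStepA, pvStepB, hf] using h
  have eA : pvStepA f sA i = (sA.1 ++ [i], sA.2 ++ [(k : Int)]) := by
    simp [pvStepA, hf]
  obtain ⟨hlen, hrel⟩ := h
  rcases hrel with ⟨hnil, hsb⟩ | ⟨hmax, j, hidx, hget⟩
  · -- first match: B takes it (k ≥ 0 > -1)
    have h1 : sA.1 = [] := by
      cases hA1 : sA.1 with
      | nil => rfl
      | cons a as => rw [hA1, hnil] at hlen; simp at hlen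
    have eB : pvStepB f sB i = (some i, (k : Int)) := by
      have : sB.2 < (k : Int) := by rw [hsb]; exact by omega
      simp [pvStepB, hf, this]
    rw [eA, eB]
    refine ⟨by simp [hlen], Or.inr ⟨?_, 0, ?_, ?_⟩⟩
    · rw [hnil]
      simp [PySem.List.max?_id_cons]
    · rw [hnil]
      simp [PySem.List.index?_eq_idxOf?]
    · rw [h1]
      simp
  · -- running best exists
    have hmem := PySem.List.max?_mem hmax
    have hA2ne : sA.2 ≠ [] := by intro hc; rw [hc] at hmem; simp at hmem
    obtain ⟨x, t, hxt⟩ := List.exists_cons_of_ne_nil hA2ne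
    have hfold : t.foldl max x = sB.2 := pvMaxIdCons (hxt ▸ hmax)
    by_cases hlt : sB.2 < (k : Int)
    · -- strictly longer: B switches, new first maximum is k at position sA.2.length
      have hnotin : (k : Int) ∉ sA.2 := by
        intro hin
        have := PySem.List.max?_isMax hmax _ hin
        omega
      have eB : pvStepB f sB i = (some i, (k : Int)) := by
        simp [pvStepB, hf, hlt]
      rw [eA, eB]
      refine ⟨by simp [hlen], Or.inr ⟨?_, sA.2.length, ?_, ?_⟩⟩
      · rw [hxt, List.cons_append, PySem.List.max?_id_cons, List.foldl_append, hfold]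
        simp
        omega
      · exact PySem.List.index?_append_singleton_self sA.2 _ hnotin
      · rw [← hlen, show sA.1 ++ [i] = sA.1 ++ i :: [] from rfl,
          PySem.List.pyGet?_append_length]
    · -- not longer: B keeps its best, the first maximum is unchanged
      have eB : pvStepB f sB i = sB := by
        simp [pvStepB, hf, hlt]
      rw [eA, eB]
      refine ⟨by simp [hlen], Or.inr ⟨?_, j, ?_, ?_⟩⟩
      · rw [hxt, List.cons_append, PySem.List.max?_id_cons, List.foldl_append, hfold]
        have : max sB.2 (k : Int) = sB.2 := by omega
        simp [this]
      · rw [PySem.List.index?_append_of_mem _ hmem, hidx]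
      · obtain ⟨hjlt, -, -⟩ := PySem.List.getElem_of_index?_eq_some hidx
        have hjlt1 : j < sA.1.length := by omega
        rw [hget, PySem.List.pyGet?_natCast, PySem.List.pyGet?_natCast,
          List.getElem?_append_left hjlt1]

theorem pvFold (f : Int → Bool × Option Int)
    (hf : ∀ i, f i = (false, none) ∨ ∃ k : Nat, f i = (true, some (k : Int))) (n : Nat) :
    pvRel ((PySem.List.pyRange 0 (n : Int)).foldl (pvStepA f) ([], []))
          ((PySem.List.pyRange 0 (n : Int)).foldl (pvStepB f) (none, -1)) := by
  induction n with
  | zero =>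
    rw [show ((0 : Nat) : Int) = 0 by rfl, PySem.List.pyRange_one_eq_nil le_rfl]
    exact ⟨rfl, Or.inl ⟨rfl, rfl⟩⟩
  | succ n ih =>
    have hcast : ((n + 1 : Nat) : Int) = (n : Int) + 1 := by push_cast; ring
    rw [hcast, PySem.List.pyRange_one_succ_right (by positivity), List.foldl_append,
      List.foldl_append]
    exact pvStep f _ _ _ (hf _) ih

-- A's final decision applied to a state related to B's accumulator yields B's answer.
theorem pvDecision (sA : List Int × List Int) (sB : Option Int × Int) (h : pvRel sA sB) :
    (if sA.1.length = 1 then PySem.List.pyGet? sA.1 0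
     else if 1 < sA.1.length then
       match PySem.List.max? sA.2 (fun x => x) with
       | none => none
       | some mx =>
         match PySem.List.index? sA.2 mx with
         | none => none
         | some j => PySem.List.pyGet? sA.1 (j : Int)
     else none) = sB.1 := by
  obtain ⟨hlen, hrel⟩ := h
  rcases hrel with ⟨hnil, hsb⟩ | ⟨hmax, j, hidx, hget⟩
  · have h0 : sA.1.length = 0 := by rw [hlen, hnil]; rfl
    rw [if_neg (by omega), if_neg (by omega), hsb]
  · obtain ⟨hjlt, -, -⟩ := PySem.List.getElem_of_index?_eq_some hidx
    by_cases h1 : sA.1.length = 1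
    · have hj0 : j = 0 := by omega
      rw [if_pos h1, hget, hj0]
      rfl
    · have hge : 1 < sA.1.length := by
        have : sA.2 ≠ [] := fun hc => by rw [hc] at hmax; simp [PySem.List.max?] at hmax
        have : 0 < sA.2.length := List.length_pos_iff.mpr this
        omega
      rw [if_neg h1, if_pos hge, hmax]
      dsimp only
      rw [hidx]
      exact hget.symm

theorem pvEnumMem (ups : List (List (String × String)))
    (p : Int × List (String × String)) (hp : p ∈ PySem.List.enumerate ups 0) :
    ∃ k : Nat, p.1 = (k : Int) ∧ PySem.List.pyGet? ups p.1 = some p.2 := by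
  obtain ⟨k, hk, hkp⟩ := List.getElem_of_mem hp
  have hk' : k < ups.length := by
    rw [PySem.List.length_enumerate] at hk; exact hk
  rw [PySem.List.getElem_enumerate] at hkp
  refine ⟨k, ?_, ?_⟩
  · rw [← hkp]; simp
  · rw [← hkp]
    simp [PySem.List.pyGet?_natCast, List.getElem?_eq_getElem hk']

-- ===== VERDICT (by name: the statement is the Claim_ definition above) =====
theorem path_matching_spec : Claim_equal_path_matching := by
  intro url ups masks _hdom _hpre
  unfold Spec_path_matching path_matching path_matching_alt
  set f : Int → Bool × Option Int := fun i =>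
    is_matched_path url ((PySem.List.pyGet? ups i).getD []) ((PySem.List.pyGet? masks i).getD []) with hf_def
  have hshape : ∀ i, f i = (false, none) ∨ ∃ k : Nat, f i = (true, some (k : Int)) :=
    fun i => pvShape url _ _
  -- B's enumerate loop = the indexed loop over range(len(url_patterns))
  have hB : (PySem.List.enumerate ups 0).foldl
      (fun (acc : Option Int × Int) (p : Int × List (String × String)) =>
        match is_matched_path url p.2 ((PySem.List.pyGet? masks p.1).getD []) with
        | (m, ml) => if m && decide (acc.2 < ml.getD 0) then (some p.1, ml.getD 0) else acc)
      (none, -1)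
      = (PySem.List.pyRange 0 (ups.length : Int)).foldl (pvStepB f) (none, -1) := by
    rw [PySem.List.foldl_congr_mem _ _ (fun acc p => pvStepB f acc p.1) _ ?_]
    · rw [show (fun (acc : Option Int × Int) (p : Int × List (String × String)) =>
          pvStepB f acc p.1) = (fun acc p => pvStepB f acc (Prod.fst p)) from rfl,
        ← List.foldl_map, PySem.List.map_fst_enumerate]
      norm_num
    · intro acc p hp
      obtain ⟨k, -, hget⟩ := pvEnumMem ups p hp
      simp only [pvStepB, hf_def, hget, Option.getD_some]
  have hA : (fun (acc : List Int × List Int) (i : Int) =>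
      match is_matched_path url ((PySem.List.pyGet? ups i).getD [])
        ((PySem.List.pyGet? masks i).getD []) with
      | (m, ml) => if m then (acc.1 ++ [i], acc.2 ++ [ml.getD 0]) else acc) = pvStepA f := rfl
  simp only [hA, hB]
  exact pvDecision _ _ (pvFold f hshape ups.length)
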